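-- pv_equiv track=rewrite | github.com/vivekkant/coding-challenges-python | designer_doormat.py | print_doormat_pattern
-- ===== SOURCE A (Python) =====
-- def print_doormat_pattern(m, n):
--
--     pattern = []
--
--     for k in range(m // 2):
--         line = ""
--         for i in range((k * 2) + 1):
--             line += ".|."
--         line = line.center(n, '-')
--         pattern.append(line)
--
--     center_line = "WELCOME"
--     center_line = center_line.center(n, '-')
--     pattern.append(center_line)
--
--     for k in range(m // 2):
--         j = (m // 2) - k - 1
--         pattern.append(pattern[j])
--
--     return pattern
-- ===== SOURCE B (Python) =====
-- def print_doormat_pattern(m, n):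
--     h = m // 2
--     rows = 2 * h + 1
--     return [("WELCOME" if i == h else ".|." * (2 * min(i, rows - 1 - i) + 1)).center(n, '-')
--             for i in range(rows)]
-- ===== Notes on version B (the rewrite author's own statement) =====
-- stated objective: idiomatic
-- what changed: Single comprehension computes each of the 2*(m//2)+1 lines directly from its position via depth = min(i, rows-1-i) with one string-repeat, instead of A's three passes (character-by-character += per line, append WELCOME, mirror by indexing back into the list being built).
-- outside the precondition, e.g. on print_doormat_pattern(-2, 5): A returns ['WELCOME'], B returns []
import Mathlib
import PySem

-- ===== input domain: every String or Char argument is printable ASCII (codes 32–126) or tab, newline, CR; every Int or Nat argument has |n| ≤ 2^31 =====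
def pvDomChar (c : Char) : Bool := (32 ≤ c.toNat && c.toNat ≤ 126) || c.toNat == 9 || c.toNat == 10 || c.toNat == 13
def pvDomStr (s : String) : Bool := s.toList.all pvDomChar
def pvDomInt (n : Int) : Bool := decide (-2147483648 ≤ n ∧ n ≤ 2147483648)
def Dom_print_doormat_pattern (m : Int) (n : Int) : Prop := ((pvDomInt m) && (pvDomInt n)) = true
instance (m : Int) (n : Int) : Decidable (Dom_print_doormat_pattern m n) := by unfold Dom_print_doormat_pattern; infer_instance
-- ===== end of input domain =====

-- B builds each of the 2*(m//2)+1 lines directly from its position (depth = min(i, rows-1-i))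
-- in one comprehension, instead of A's three passes (top loop, WELCOME, mirror via back-indexing).

-- shared port of the library call str.center(n, '-') (CPython: left margin = marg//2 + (marg & width & 1)); exact
def pyCenterDash (s : List Char) (n : Int) : List Char :=
  if n ≤ (s.length : Int) then s
  else
    let w := n.toNat
    let marg := w - s.length
    let left := marg / 2 + (if marg % 2 = 1 ∧ w % 2 = 1 then 1 else 0)
    List.replicate left '-' ++ s ++ List.replicate (marg - left) '-'

-- ===== PORT A =====
def print_doormat_pattern (m : Int) (n : Int) : List String :=
  let pattern : List String :=
    (PySem.List.pyRange 0 (PySem.Int.floordiv m 2) 1).foldl (fun pat k =>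
      let line : List Char :=
        (PySem.List.pyRange 0 (k * 2 + 1) 1).foldl (fun l _ => l ++ ".|.".toList) []
      pat ++ [String.ofList (pyCenterDash line n)]) []
  let pattern := pattern ++ [String.ofList (pyCenterDash "WELCOME".toList n)]
  (PySem.List.pyRange 0 (PySem.Int.floordiv m 2) 1).foldl (fun pat k =>
    let j := PySem.Int.floordiv m 2 - k - 1
    pat ++ [PySem.List.pyGetD pat j ""]) pattern

-- ===== PORT B =====
def print_doormat_pattern_alt (m : Int) (n : Int) : List String :=
  let h := PySem.Int.floordiv m 2
  let rows := 2 * h + 1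
  (PySem.List.pyRange 0 rows 1).map (fun i =>
    String.ofList (pyCenterDash
      (if i = h then "WELCOME".toList
       else PySem.List.pyRepeat ".|.".toList (2 * min i (rows - 1 - i) + 1)) n))

-- ===== PRECONDITION & SPEC =====
-- Pre_ excludes negative m, a degenerate doormat height on which A's single WELCOME line
-- (fallout of its unconditional center append) and B's empty list are equally defensible.
def Pre_print_doormat_pattern (m : Int) (n : Int) : Prop := 0 ≤ m
instance (m : Int) (n : Int) : Decidable (Pre_print_doormat_pattern m n) := by
  unfold Pre_print_doormat_pattern; infer_instance
def pvWitness_print_doormat_pattern : Int × Int := (7, 21)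

def Spec_print_doormat_pattern (m : Int) (n : Int) (out : List String) : Prop := out = print_doormat_pattern_alt m n
instance (m : Int) (n : Int) (out : List String) : Decidable (Spec_print_doormat_pattern m n out) := by unfold Spec_print_doormat_pattern; infer_instance

-- ===== CLAIM (what is proved, stated in full; the proofs are below) =====
def Claim_equal_print_doormat_pattern : Prop := ∀ (m : Int) (n : Int), Dom_print_doormat_pattern m n → Pre_print_doormat_pattern m n → Spec_print_doormat_pattern m n (print_doormat_pattern m n)

-- ===== LEMMAS AND PROOFS =====

-- helper values used only by the proofs
def pvRow (nn : Int) (j : Nat) : String :=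
  String.ofList (pyCenterDash (PySem.List.pyRepeat ".|.".toList ((j : Int) * 2 + 1)) nn)
def pvW (nn : Int) : String := String.ofList (pyCenterDash "WELCOME".toList nn)

-- a loop that appends a constant chunk each iteration builds replicate-and-flatten
theorem pv_foldl_const_append {α : Type} (c : List Char) :
    ∀ (l : List α) (init : List Char),
      l.foldl (fun acc _ => acc ++ c) init = init ++ (List.replicate l.length c).flatten
  | [], init => by simp
  | _ :: xs, init => by
      simp [List.foldl_cons, pv_foldl_const_append c xs, List.replicate_succ,
        List.append_assoc]

-- a loop appending pat[f k] only reads indices below the ORIGINAL length, so it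
-- equals the original list followed by a map over the original list
theorem pv_foldl_self_getD (d : String) (f : Nat → Int) :
    ∀ (l : List Nat) (pat : List String),
      (∀ k ∈ l, 0 ≤ f k ∧ f k < (pat.length : Int)) →
      l.foldl (fun p k => p ++ [PySem.List.pyGetD p (f k) d]) pat
        = pat ++ l.map (fun k => PySem.List.pyGetD pat (f k) d)
  | [], pat, _ => by simp
  | x :: xs, pat, hb => by
      have hx := hb x (List.mem_cons_self ..)
      have hlen : ((pat ++ [PySem.List.pyGetD pat (f x) d]).length : Int)
          = (pat.length : Int) + 1 := by simp
      have hrec := pv_foldl_self_getD d f xs (pat ++ [PySem.List.pyGetD pat (f x) d])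
        (fun k hk => by
          have := hb k (List.mem_cons_of_mem _ hk)
          constructor
          · exact this.1
          · rw [hlen]; omega)
      have hmap : xs.map (fun k => PySem.List.pyGetD (pat ++ [PySem.List.pyGetD pat (f x) d]) (f k) d)
          = xs.map (fun k => PySem.List.pyGetD pat (f k) d) := by
        refine List.map_congr_left (fun k hk => ?_)
        have hkb := hb k (List.mem_cons_of_mem _ hk)
        have h1 : (f k).toNat < pat.length := by omega
        rw [PySem.List.pyGetD_eq_getElem _ _ hkb.1 (by rw [hlen]; omega),
            PySem.List.pyGetD_eq_getElem _ _ hkb.1 hkb.2,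
            List.getElem_append_left h1]
      rw [List.foldl_cons, hrec, hmap]
      simp [List.append_assoc]

-- ===== VERDICT (by name: the statement is the Claim_ definition above) =====
theorem print_doormat_pattern_spec : Claim_equal_print_doormat_pattern := by
  intro m n _ hm
  unfold Spec_print_doormat_pattern Pre_print_doormat_pattern at *
  have hh : 0 ≤ PySem.Int.floordiv m 2 := by
    rw [PySem.Int.le_floordiv_iff_mul_le (by omega)]; omega
  set h := PySem.Int.floordiv m 2 with hhdef
  set N := h.toNat with hNdef
  have hN : (N : Int) = h := Int.toNat_of_nonneg hh
  -- evaluate port A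
  have hA : print_doormat_pattern m n
      = (List.range N).map (pvRow n) ++ [pvW n]
        ++ (List.range N).map (fun (k : Nat) =>
             PySem.List.pyGetD ((List.range N).map (pvRow n) ++ [pvW n]) (h - (k : Int) - 1) "") := by
    unfold print_doormat_pattern
    rw [← hhdef]
    rw [PySem.List.pyRange_one 0 h]
    simp only [Int.sub_zero, ← hNdef, List.foldl_map]
    have hinner : ∀ k : Nat,
        (PySem.List.pyRange 0 ((0 + (k : Int)) * 2 + 1) 1).foldl
            (fun l _ => l ++ ".|.".toList) []
          = PySem.List.pyRepeat ".|.".toList ((k : Int) * 2 + 1) := by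
      intro k
      rw [pv_foldl_const_append, PySem.List.length_pyRange_one]
      simp [PySem.List.pyRepeat]
    have h1 : (List.range N).foldl
        (fun (pat : List String) (k : Nat) => pat ++ [String.ofList (pyCenterDash
          ((PySem.List.pyRange 0 ((0 + (k : Int)) * 2 + 1) 1).foldl
            (fun l _ => l ++ ".|.".toList) []) n)]) ([] : List String)
        = (List.range N).map (pvRow n) := by
      rw [PySem.List.foldl_append_singleton_eq_map]
      simp only [List.nil_append]
      refine List.map_congr_left (fun k _ => ?_)
      rw [hinner k]; rfl
    rw [h1]
    rw [pv_foldl_self_getD "" (fun k => h - (0 + (k : Int)) - 1) (List.range N)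
      _ (fun k hk => by
        have hk' : k < N := List.mem_range.mp hk
        constructor
        · show (0 : Int) ≤ h - (0 + (k : Int)) - 1
          omega
        · show h - (0 + (k : Int)) - 1 < _
          simp only [List.length_append, List.length_map, List.length_range]
          push_cast
          omega)]
    congr 1
    exact List.map_congr_left (fun k _ => by norm_num [pvW])
  -- evaluate port B
  have hB : print_doormat_pattern_alt m n
      = (List.range N).map (pvRow n) ++ [pvW n]
        ++ (List.range N).map (fun k => pvRow n (N - 1 - k)) := by
    simp only [print_doormat_pattern_alt]
    rw [← hhdef]
    rw [PySem.List.pyRange_one 0 (2 * h + 1)]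
    have hlen : (2 * h + 1 - 0).toNat = (N + 1) + N := by omega
    rw [hlen, List.map_map, List.range_add, List.range_succ]
    simp only [List.map_append, List.map_map]
    congr 1
    · congr 1
      · refine List.map_congr_left (fun k hk => ?_)
        have hk' : k < N := List.mem_range.mp hk
        have hne : (0 : Int) + (k : Int) ≠ h := by omega
        have hmin : min ((0 : Int) + (k : Int)) (2 * h + 1 - 1 - (0 + (k : Int)))
            = (k : Int) := by omega
        simp only [Function.comp, hne, if_false, hmin, pvRow]
        ring_nf
      · simp [Function.comp, hN, pvW]
    · refine List.map_congr_left (fun k hk => ?_)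
      have hk' : k < N := List.mem_range.mp hk
      have hne : (0 : Int) + ((N + 1 + k : Nat) : Int) ≠ h := by push_cast; omega
      have hmin : min ((0 : Int) + ((N + 1 + k : Nat) : Int))
          (2 * h + 1 - 1 - (0 + ((N + 1 + k : Nat) : Int))) = ((N - 1 - k : Nat) : Int) := by
        push_cast; omega
      simp only [Function.comp, hne, if_false, hmin, pvRow]
      ring_nf
  rw [hA, hB]
  congr 1
  refine List.map_congr_left (fun k hk => ?_)
  have hk' : k < N := List.mem_range.mp hk
  have h0 : (0 : Int) ≤ h - (k : Int) - 1 := by omega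
  have h1 : h - (k : Int) - 1 < (((List.range N).map (pvRow n) ++ [pvW n]).length : Int) := by
    simp only [List.length_append, List.length_map, List.length_range]; omega
  rw [PySem.List.pyGetD_eq_getElem _ _ h0 h1]
  have ht2 : (h - (k : Int) - 1).toNat < ((List.range N).map (pvRow n)).length := by
    simp only [List.length_map, List.length_range]; omega
  rw [List.getElem_append_left ht2]
  simp only [List.getElem_map, List.getElem_range]
  congr 1
  omega
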